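-- pv_equiv track=rewrite | github.com/shahram8708/CLAT | app/routes/admin.py | _shift_month
-- ===== SOURCE A (Python) =====
-- def _shift_month(year_value, month_value, delta):
--     month_index = month_value + delta
--     year = year_value
--
--     while month_index <= 0:
--         month_index += 12
--         year -= 1
--
--     while month_index > 12:
--         month_index -= 12
--         year += 1
--
--     return year, month_index
-- ===== SOURCE B (Python) =====
-- def _shift_month(year_value, month_value, delta):
--     q, r = divmod(month_value + delta - 1, 12)
--     return year_value + q, r + 1
-- ===== Notes on version B (the rewrite author's own statement) =====
-- stated objective: simpler
-- what changed: Both while loops (stepping month by 12 and carrying the year one step at a time) are replaced by a single closed-form divmod on month_value+delta-1.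
import Mathlib
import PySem

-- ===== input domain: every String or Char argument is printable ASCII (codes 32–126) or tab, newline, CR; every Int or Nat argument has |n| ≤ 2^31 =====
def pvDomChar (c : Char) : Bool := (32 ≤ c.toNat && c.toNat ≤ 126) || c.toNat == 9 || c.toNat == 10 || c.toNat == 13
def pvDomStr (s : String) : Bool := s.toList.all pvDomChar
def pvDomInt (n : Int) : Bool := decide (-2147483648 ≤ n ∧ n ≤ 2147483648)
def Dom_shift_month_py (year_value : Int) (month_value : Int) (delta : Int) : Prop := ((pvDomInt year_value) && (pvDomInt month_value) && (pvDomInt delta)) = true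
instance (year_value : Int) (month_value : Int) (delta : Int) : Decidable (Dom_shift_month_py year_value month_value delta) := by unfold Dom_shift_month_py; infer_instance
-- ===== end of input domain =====

-- B replaces A's two carry-by-one while loops with a single closed-form divmod (simpler, no iteration).


-- ===== PORT A =====
-- while month_index <= 0: month_index += 12; year -= 1
def pvUpLoop (year month_index : Int) : Int × Int :=
  if month_index ≤ 0 then pvUpLoop (year - 1) (month_index + 12)
  else (year, month_index)
termination_by (1 - month_index).toNat
decreasing_by omega

-- while month_index > 12: month_index -= 12; year += 1
def pvDownLoop (year month_index : Int) : Int × Int :=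
  if month_index > 12 then pvDownLoop (year + 1) (month_index - 12)
  else (year, month_index)
termination_by month_index.toNat
decreasing_by omega

def shift_month_py (year_value : Int) (month_value : Int) (delta : Int) : Int × Int :=
  let p := pvUpLoop year_value (month_value + delta)
  pvDownLoop p.1 p.2

-- ===== PORT B =====
-- closed form: q, r = divmod(month_value + delta - 1, 12); return year_value + q, r + 1
def shift_month_py_alt (year_value : Int) (month_value : Int) (delta : Int) : Int × Int :=
  let q := PySem.Int.floordiv (month_value + delta - 1) 12
  let r := PySem.Int.mod (month_value + delta - 1) 12
  (year_value + q, r + 1)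

-- ===== PRECONDITION & SPEC =====
def Spec_shift_month_py (year_value : Int) (month_value : Int) (delta : Int) (out : Int × Int) : Prop := out = shift_month_py_alt year_value month_value delta
instance (year_value : Int) (month_value : Int) (delta : Int) (out : Int × Int) : Decidable (Spec_shift_month_py year_value month_value delta out) := by unfold Spec_shift_month_py; infer_instance

-- ===== CLAIM (what is proved, stated in full; the proofs are below) =====
def Claim_equal_shift_month_py : Prop := ∀ (year_value : Int) (month_value : Int) (delta : Int), Dom_shift_month_py year_value month_value delta → Spec_shift_month_py year_value month_value delta (shift_month_py year_value month_value delta)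

-- ===== LEMMAS AND PROOFS =====
theorem pvUpLoop_spec (year month_index : Int) :
    12 * (pvUpLoop year month_index).1 + (pvUpLoop year month_index).2
      = 12 * year + month_index ∧ 1 ≤ (pvUpLoop year month_index).2 := by
  fun_induction pvUpLoop year month_index with
  | case1 y m h ih =>
      exact ⟨by omega, ih.2⟩
  | case2 y m h =>
      exact ⟨by omega, by omega⟩

theorem pvDownLoop_spec (year month_index : Int) (h1 : 1 ≤ month_index) :
    12 * (pvDownLoop year month_index).1 + (pvDownLoop year month_index).2
      = 12 * year + month_index ∧ 1 ≤ (pvDownLoop year month_index).2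
      ∧ (pvDownLoop year month_index).2 ≤ 12 := by
  fun_induction pvDownLoop year month_index with
  | case1 y m h ih =>
      have := ih (by omega)
      exact ⟨by omega, this.2⟩
  | case2 y m h =>
      exact ⟨by omega, by omega, by omega⟩

-- ===== VERDICT (by name: the statement is the Claim_ definition above) =====
theorem shift_month_py_spec : Claim_equal_shift_month_py := by
  intro y m d _
  unfold Spec_shift_month_py shift_month_py shift_month_py_alt
  have hu := pvUpLoop_spec y (m + d)
  have hd := pvDownLoop_spec (pvUpLoop y (m + d)).1 (pvUpLoop y (m + d)).2 hu.2
  rw [PySem.Int.floordiv_eq_ediv_of_pos (by omega), PySem.Int.mod_eq_emod_of_pos (by omega)]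
  obtain ⟨h1, h2, h3⟩ := hd
  have hsum : 12 * (pvDownLoop (pvUpLoop y (m + d)).1 (pvUpLoop y (m + d)).2).1
      + (pvDownLoop (pvUpLoop y (m + d)).1 (pvUpLoop y (m + d)).2).2 = 12 * y + (m + d) := by omega
  have := Prod.mk.eta (p := pvDownLoop (pvUpLoop y (m + d)).1 (pvUpLoop y (m + d)).2)
  rw [← this]
  simp only [Prod.mk.injEq]
  constructor <;> omega
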